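-- pv_equiv track=rewrite | github.com/daniel-reich/ubiquitous-fiesta | i747Wtc7pCukr8GRC_21.py | min_product
-- ===== SOURCE A (Python) =====
-- from itertools import permutations
--
-- def min_product(lst):
--   perm=permutations(lst,3)
--   c=123423432
--   prod=1
--   for i in list(perm):
--     for d in i:
--       prod=prod*d
--     if prod<c:
--       c=prod
--     prod=1
--   return c
-- ===== SOURCE B (Python) =====
-- def min_product(lst):
--     c = 123423432
--     if len(lst) >= 3:
--         s = sorted(lst)
--         c = min(c, s[0] * s[1] * s[2], s[0] * s[-2] * s[-1])
--     return c
-- ===== Notes on version B (the rewrite author's own statement) =====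
-- stated objective: faster
-- what changed: Instead of multiplying out all O(n^3) ordered triples from itertools.permutations, B sorts the list once and takes the minimum of the cap 123423432 and the only two possible minimal triple products of a sorted list: the three smallest elements and the smallest element times the two largest.
import Mathlib
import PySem

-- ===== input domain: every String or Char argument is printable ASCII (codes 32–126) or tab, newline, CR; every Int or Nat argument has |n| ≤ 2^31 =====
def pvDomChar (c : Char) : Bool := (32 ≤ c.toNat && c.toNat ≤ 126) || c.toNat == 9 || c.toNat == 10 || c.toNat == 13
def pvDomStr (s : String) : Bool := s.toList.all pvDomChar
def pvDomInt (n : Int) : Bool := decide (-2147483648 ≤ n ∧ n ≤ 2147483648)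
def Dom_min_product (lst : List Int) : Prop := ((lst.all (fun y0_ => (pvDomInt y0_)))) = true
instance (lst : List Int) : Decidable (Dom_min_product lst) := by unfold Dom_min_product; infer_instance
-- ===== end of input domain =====

-- B replaces A's scan over all O(n^3) ordered triples by one sort and two candidate
-- products (three smallest; smallest times two largest), min'ed with A's cap.

-- ===== PORT A =====
def min_product (lst : List Int) : Int :=
  -- perm = permutations(lst, 3)  (itertools → PySem.List.permutations)
  let perm := PySem.List.permutations lst 3
  -- c = 123423432; prod = 1; for i in list(perm): for d in i: prod = prod*d; if prod < c: c = prod; prod = 1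
  (perm.foldl (fun (s : Int × Int) (i : List Int) =>
      let prod := i.foldl (fun p d => p * d) s.2
      let c := if prod < s.1 then prod else s.1
      (c, 1)) ((123423432 : Int), (1 : Int))).1

-- ===== PORT B =====
def min_product_alt (lst : List Int) : Int :=
  let c : Int := 123423432
  if 3 ≤ lst.length then
    let s := PySem.List.sorted lst (fun x => x) false
    -- min(c, s[0]*s[1]*s[2], s[0]*s[-2]*s[-1])
    min (min c (PySem.List.pyGetD s 0 0 * PySem.List.pyGetD s 1 0 * PySem.List.pyGetD s 2 0))
      (PySem.List.pyGetD s 0 0 * PySem.List.pyGetD s (-2) 0 * PySem.List.pyGetD s (-1) 0)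
  else c

-- ===== PRECONDITION & SPEC =====
def Spec_min_product (lst : List Int) (out : Int) : Prop := out = min_product_alt lst
instance (lst : List Int) (out : Int) : Decidable (Spec_min_product lst out) := by unfold Spec_min_product; infer_instance

-- ===== CLAIM (what is proved, stated in full; the proofs are below) =====
def Claim_equal_min_product : Prop := ∀ (lst : List Int), Dom_min_product lst → Spec_min_product lst (min_product lst)

-- ===== LEMMAS AND PROOFS =====

-- A's outer loop, with the running (c, prod) pair, is a fold of `min` over the triple products.
theorem foldA (l : List (List Int)) (c : Int) :
    (l.foldl (fun (s : Int × Int) (i : List Int) =>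
      let prod := i.foldl (fun p d => p * d) s.2
      let c := if prod < s.1 then prod else s.1
      (c, 1)) (c, (1 : Int))).1
    = l.foldl (fun c t => min c t.prod) c := by
  induction l generalizing c with
  | nil => rfl
  | cons t l ih =>
    simp only [List.foldl_cons]
    rw [ih]
    congr 1
    rw [List.prod_eq_foldl]
    split_ifs <;> omega

-- fold of min is a lower bound of the start value and of every element's image
theorem foldlMin_le_init (l : List (List Int)) (c : Int) :
    l.foldl (fun c t => min c t.prod) c ≤ c := by
  induction l generalizing c with
  | nil => simp
  | cons t l ih => exact le_trans (ih _) (min_le_left _ _)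

theorem foldlMin_le_mem (l : List (List Int)) (c : Int) (t : List Int) (ht : t ∈ l) :
    l.foldl (fun c t => min c t.prod) c ≤ t.prod := by
  induction l generalizing c t with
  | nil => cases ht
  | cons t' l ih =>
    simp only [List.foldl_cons]
    rcases List.mem_cons.mp ht with rfl | ht'
    · exact le_trans (foldlMin_le_init _ _) (min_le_right _ _)
    · exact ih (min c t'.prod) t ht'

theorem foldlMin_cases (l : List (List Int)) (c : Int) :
    l.foldl (fun c t => min c t.prod) c = c ∨
      ∃ t ∈ l, l.foldl (fun c t => min c t.prod) c = t.prod := by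
  induction l generalizing c with
  | nil => exact Or.inl rfl
  | cons t l ih =>
    rcases ih (min c t.prod) with h | ⟨t', ht', h⟩
    · rcases min_cases c t.prod with ⟨h', _⟩ | ⟨h', _⟩
      · exact Or.inl (by simp only [List.foldl_cons]; omega)
      · exact Or.inr ⟨t, List.mem_cons_self, by simp only [List.foldl_cons]; omega⟩
    · exact Or.inr ⟨t', List.mem_cons_of_mem _ ht', by simpa using h⟩

-- membership in PySem.List.permutations xs r  ↔  length r ∧ sub-multiset
theorem permutations_mem_length_subperm {xs t : List Int} {r : Nat}
    (h : t ∈ PySem.List.permutations xs r) : t.length = r ∧ List.Subperm t xs := by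
  induction r generalizing t xs with
  | zero =>
    simp [PySem.List.permutations] at h
    subst h; exact ⟨rfl, List.nil_subperm⟩
  | succ r ih =>
    simp only [PySem.List.permutations, List.mem_flatMap, List.mem_range] at h
    obtain ⟨i, hi, hmem⟩ := h
    rcases hx : xs[i]? with _ | x
    · rw [hx] at hmem; simp at hmem
    · rw [hx] at hmem
      simp only [List.mem_map] at hmem
      obtain ⟨t', ht', rfl⟩ := hmem
      obtain ⟨hlen, hsub⟩ := ih ht'
      have hxi : xs[i]'(by simpa using (List.getElem?_eq_some_iff.mp hx).1) = x :=
        (List.getElem?_eq_some_iff.mp hx).2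
      have hperm : (x :: xs.eraseIdx i).Perm xs := by
        rw [← hxi]
        exact List.getElem_cons_eraseIdx_perm (by simpa using (List.getElem?_eq_some_iff.mp hx).1)
      exact ⟨by simp [hlen], ((List.subperm_cons x).mpr hsub).trans hperm.subperm⟩

theorem subperm_mem_permutations {xs t : List Int} {r : Nat}
    (hlen : t.length = r) (hsub : List.Subperm t xs) : t ∈ PySem.List.permutations xs r := by
  induction r generalizing t xs with
  | zero =>
    rcases List.length_eq_zero_iff.mp hlen with rfl
    simp [PySem.List.permutations]
  | succ r ih =>
    rcases t with _ | ⟨a, t'⟩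
    · simp at hlen
    · have ha : a ∈ xs := by
        have := List.subperm_iff_count.mp hsub a
        simp only [List.count_cons_self] at this
        exact List.count_pos_iff.mp (by omega)
      have hsub' : List.Subperm t' (xs.erase a) := by
        rw [List.subperm_iff_count]
        intro b
        have hb := List.subperm_iff_count.mp hsub b
        by_cases hba : b = a
        · subst hba
          rw [List.count_erase_self]
          simp only [List.count_cons_self] at hb
          omega
        · rw [List.count_erase_of_ne hba]
          simp only [List.count_cons] at hb
          split_ifs at hb with hcond
          · simp only [beq_iff_eq] at hcond
            exact absurd hcond.symm hba
          · omega
      have hi : xs.idxOf a < xs.length := List.idxOf_lt_length_of_mem ha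
      have hgi : xs[xs.idxOf a]? = some a := by
        rw [List.getElem?_eq_getElem hi, List.getElem_idxOf]
      simp only [PySem.List.permutations, List.mem_flatMap, List.mem_range]
      refine ⟨xs.idxOf a, hi, ?_⟩
      rw [hgi]
      simp only [List.mem_map]
      refine ⟨t', ih (by simpa using hlen) ?_, rfl⟩
      rwa [List.eraseIdx_idxOf_eq_erase]

-- abstract key inequalities
theorem key_j2 (p q r a b c u v : Int)
    (h1 : p ≤ q) (h2 : q ≤ r) (h3 : p ≤ a) (h5 : r ≤ c)
    (h6 : a ≤ b) (h7 : b ≤ c) (h8 : b ≤ u) (h9 : c ≤ v)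
    (h14 : r ≤ b) :
    min (p*q*r) (p*u*v) ≤ a*b*c := by
  have h4 : q ≤ b := le_trans h2 h14
  rcases le_or_gt c 0 with hc | hc
  · refine le_trans (min_le_left _ _) ?_
    have e1 : (-a)*(-b) ≤ (-p)*(-q) :=
      mul_le_mul (by linarith) (by linarith) (by linarith) (by linarith)
    have e2 : (-a)*(-b)*(-c) ≤ (-p)*(-q)*(-r) :=
      mul_le_mul e1 (by linarith) (by linarith)
        (mul_nonneg (by linarith) (by linarith))
    nlinarith [e2]
  · rcases le_or_gt 0 b with hb | hb
    · rcases le_or_gt 0 a with ha | ha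
      · rcases le_or_gt 0 p with hp | hp
        · refine le_trans (min_le_left _ _) ?_
          have e1 : p*q ≤ a*b := mul_le_mul h3 h4 (by linarith) ha
          exact mul_le_mul e1 h5 (by linarith) (mul_nonneg ha hb)
        · refine le_trans (min_le_right _ _) ?_
          have hu : (0:Int) ≤ u := by linarith
          have hv : (0:Int) ≤ v := by linarith
          nlinarith [mul_nonneg hu hv, mul_nonneg (mul_nonneg ha hb) hc.le]
      · refine le_trans (min_le_right _ _) ?_
        have e1 : b*c ≤ u*v := mul_le_mul h8 h9 hc.le (by linarith)
        have hbc : 0 ≤ b*c := mul_nonneg hb hc.le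
        nlinarith [e1, hbc]
    · -- b < 0 < c : a*b*c ≥ 0 and p*q*r ≤ 0
      refine le_trans (min_le_left _ _) ?_
      have hq : q < 0 := lt_of_le_of_lt h4 hb
      have hr : r < 0 := lt_of_le_of_lt h14 hb
      have ha : a < 0 := lt_of_le_of_lt h6 hb
      have hp : p < 0 := lt_of_le_of_lt (h3.trans h6) hb
      have e1 : 0 ≤ a*b := by nlinarith
      have e2 : 0 ≤ a*b*c := mul_nonneg e1 hc.le
      have e3 : 0 < q*r := mul_pos_of_neg_of_neg hq hr
      nlinarith [e2, e3]

theorem key_j1 (p q r c u v : Int)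
    (h1 : p ≤ q) (h2 : q ≤ r) (h5 : r ≤ c) (h9 : c ≤ v)
    (h11 : q ≤ u) :
    min (p*q*r) (p*u*v) ≤ p*q*c := by
  rcases le_or_gt 0 (p*q) with hpq | hpq
  · exact le_trans (min_le_left _ _) (mul_le_mul_of_nonneg_left h5 hpq)
  · refine le_trans (min_le_right _ _) ?_
    have hq : 0 < q := by
      rcases le_or_gt q 0 with h | h
      · exact absurd (by nlinarith : 0 ≤ p*q) (not_le.mpr hpq)
      · exact h
    have hp : p < 0 := by
      rcases le_or_gt 0 p with h | h
      · exact absurd (mul_nonneg h hq.le) (not_le.mpr hpq)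
      · exact h
    have hv : 0 < v := by linarith
    have e1 : q*v ≤ u*v := mul_le_mul_of_nonneg_right h11 hv.le
    have e3 : q*c ≤ q*v := mul_le_mul_of_nonneg_left h9 hq.le
    calc p*u*v = p*(u*v) := by ring
      _ ≤ p*(q*v) := mul_le_mul_of_nonpos_left e1 hp.le
      _ ≤ p*(q*c) := mul_le_mul_of_nonpos_left e3 hp.le
      _ = p*q*c := by ring

-- monotone access into a ≤-sorted list
theorem sorted_get_mono (s : List Int) (hs : s.Pairwise (· ≤ ·)) (i j : Nat)
    (hij : i ≤ j) (hj : j < s.length) :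
    s[i]'(lt_of_le_of_lt hij hj) ≤ s[j] := by
  rcases eq_or_lt_of_le hij with rfl | h
  · exact le_refl _
  · exact List.pairwise_iff_getElem.mp hs i j _ hj h

-- each triple product of s bounds B's candidate minimum, for sorted s
theorem key_list (s : List Int) (hs : s.Pairwise (· ≤ ·)) (h3 : 3 ≤ s.length)
    (i j k : Nat) (hij : i < j) (hjk : j < k) (hk : k < s.length) :
    min (s[0]'(by omega) * s[1]'(by omega) * s[2]'(by omega))
       (s[0]'(by omega) * s[s.length-2]'(by omega) * s[s.length-1]'(by omega))
      ≤ s[i]'(by omega) * s[j]'(by omega) * s[k]'(by omega) := by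
  have hjlen : j < s.length := by omega
  have hilen : i < s.length := by omega
  rcases Nat.lt_or_ge j 2 with hj1 | hj2
  · -- j = 1, hence i = 0
    have hj : j = 1 := by omega
    have hi : i = 0 := by omega
    subst hj; subst hi
    exact key_j1 _ _ _ _ _ _
      (sorted_get_mono s hs 0 1 (by omega) (by omega))
      (sorted_get_mono s hs 1 2 (by omega) (by omega))
      (sorted_get_mono s hs 2 k (by omega) hk)
      (sorted_get_mono s hs k (s.length-1) (by omega) (by omega))
      (sorted_get_mono s hs 1 (s.length-2) (by omega) (by omega))
  · exact key_j2 _ _ _ _ _ _ _ _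
      (sorted_get_mono s hs 0 1 (by omega) (by omega))
      (sorted_get_mono s hs 1 2 (by omega) (by omega))
      (sorted_get_mono s hs 0 i (by omega) hilen)
      (sorted_get_mono s hs 2 k (by omega) hk)
      (sorted_get_mono s hs i j hij.le hjlen)
      (sorted_get_mono s hs j k hjk.le hk)
      (sorted_get_mono s hs j (s.length-2) (by omega) (by omega))
      (sorted_get_mono s hs k (s.length-1) (by omega) (by omega))
      (sorted_get_mono s hs 2 j hj2 hjlen)

-- permutations of length 3 of a too-short list: none
theorem perms_nil {xs : List Int} {r : Nat} (h : xs.length < r) :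
    PySem.List.permutations xs r = [] := by
  rw [List.eq_nil_iff_forall_not_mem]
  intro t ht
  obtain ⟨hlen, hsub⟩ := permutations_mem_length_subperm ht
  exact absurd hsub.length_le (by omega)

-- the last two elements of a list, as a drop
theorem drop_two {s : List Int} (h : 2 ≤ s.length) :
    s.drop (s.length - 2) = [s[s.length-2]'(by omega), s[s.length-1]'(by omega)] := by
  apply List.ext_getElem
  · simp; omega
  · intro i hi1 hi2
    simp only [List.getElem_drop]
    simp only [List.length_drop] at hi1
    match i with
    | 0 => simp
    | 1 =>
      show s[s.length-2+1] = _
      simp only [List.getElem_cons_succ, List.getElem_cons_zero]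
      congr 1
      omega
    | (n+2) => omega

-- A's min over all triples, evaluated against a sorted rearrangement s of lst
theorem sorted_core (lst s : List Int) (hperm : s.Perm lst)
    (hpair : s.Pairwise (· ≤ ·)) (hslen : 3 ≤ s.length) :
    List.foldl (fun c t => min c t.prod) 123423432 (PySem.List.permutations lst 3)
      = min (min (123423432 : Int) (s[0]'(by omega) * s[1]'(by omega) * s[2]'(by omega)))
          (s[0]'(by omega) * s[s.length-2]'(by omega) * s[s.length-1]'(by omega)) := by
  have hsub1 : List.Subperm [s[0]'(by omega), s[1]'(by omega), s[2]'(by omega)] lst := by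
    refine (hperm.subperm_left).mp (List.Sublist.subperm ?_)
    match s, hslen with
    | a :: b :: c :: rest, _ =>
      show List.Sublist [a, b, c] (a :: b :: c :: rest)
      exact (((List.nil_sublist rest).cons₂ c).cons₂ b).cons₂ a
  have hsub2 : List.Subperm [s[0]'(by omega), s[s.length-2]'(by omega), s[s.length-1]'(by omega)] lst := by
    refine (hperm.subperm_left).mp (List.Sublist.subperm ?_)
    obtain ⟨a, tail, rfl⟩ : ∃ a tail, s = a :: tail := by
      rcases s with _ | ⟨a, tail⟩
      · simp at hslen
      · exact ⟨a, tail, rfl⟩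
    have hdt := drop_two (s := a :: tail) (by simp at hslen ⊢; omega)
    have hdrop : (a :: tail).drop ((a :: tail).length - 2) = tail.drop (tail.length - 2) := by
      have h1 : (a :: tail).length - 2 = (tail.length - 2) + 1 := by
        simp at hslen ⊢
        omega
      rw [h1]
      exact List.drop_succ_cons
    show List.Sublist (_ :: _) (a :: tail)
    refine List.Sublist.cons₂ a ?_
    rw [← hdt, hdrop]
    exact List.drop_sublist _ _
  have hmem1 := subperm_mem_permutations (r := 3) rfl hsub1
  have hmem2 := subperm_mem_permutations (r := 3) rfl hsub2
  refine le_antisymm ?_ ?_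
  · refine le_min (le_min (foldlMin_le_init _ _) ?_) ?_
    · refine le_trans (foldlMin_le_mem _ 123423432 _ hmem1) ?_
      simp [List.prod_cons]
      ring_nf
      exact le_refl _
    · refine le_trans (foldlMin_le_mem _ 123423432 _ hmem2) ?_
      simp [List.prod_cons]
      ring_nf
      exact le_refl _
  · rcases foldlMin_cases (PySem.List.permutations lst 3) 123423432 with hcase | ⟨t, ht, hcase⟩
    · rw [hcase]
      exact le_trans (min_le_left _ _) (min_le_left _ _)
    · rw [hcase]
      obtain ⟨htlen, htsub⟩ := permutations_mem_length_subperm ht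
      obtain ⟨q, hq_perm, hq_sub⟩ := (hperm.subperm_left).mpr htsub
      have hq_len : q.length = 3 := by rw [hq_perm.length_eq, htlen]
      have hq_prod : q.prod = t.prod := hq_perm.prod_eq
      obtain ⟨x, y, z, rfl⟩ : ∃ x y z, q = [x, y, z] := by
        rcases q with _ | ⟨x, q⟩
        · simp at hq_len
        rcases q with _ | ⟨y, q⟩
        · simp at hq_len
        rcases q with _ | ⟨z, q⟩
        · simp at hq_len
        rcases q with _ | ⟨w, q⟩
        · exact ⟨x, y, z, rfl⟩
        · simp at hq_len
      obtain ⟨f, hf⟩ := List.sublist_iff_exists_orderEmbedding_getElem?_eq.mp hq_sub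
      have hf0 := hf 0
      have hf1 := hf 1
      have hf2 := hf 2
      simp only [List.getElem?_cons_zero, List.getElem?_cons_succ] at hf0 hf1 hf2
      obtain ⟨hb0, he0⟩ := List.getElem?_eq_some_iff.mp hf0.symm
      obtain ⟨hb1, he1⟩ := List.getElem?_eq_some_iff.mp hf1.symm
      obtain ⟨hb2, he2⟩ := List.getElem?_eq_some_iff.mp hf2.symm
      have h01 : f 0 < f 1 := f.strictMono (by omega)
      have h12 : f 1 < f 2 := f.strictMono (by omega)
      have hkey := key_list s hpair hslen (f 0) (f 1) (f 2) h01 h12 hb2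
      rw [he0, he1, he2] at hkey
      have hqp : ([x, y, z] : List Int).prod = x * y * z := by
        simp [List.prod_cons]
        ring
      rw [← hq_prod, hqp]
      exact le_trans (min_le_min (min_le_right _ _) (le_refl _)) hkey

theorem main_lemma (lst : List Int) : min_product lst = min_product_alt lst := by
  have hA := foldA (PySem.List.permutations lst 3) 123423432
  by_cases h3 : 3 ≤ lst.length
  · simp only [min_product, min_product_alt, if_pos h3]
    rw [hA]
    have hperm := PySem.List.sorted_perm lst (fun x => x) false
    have hpair := PySem.List.sorted_pairwise lst (fun x => x)
    have hlen : (PySem.List.sorted lst (fun x => x) false).length = lst.length :=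
      hperm.length_eq
    have hslen : 3 ≤ (PySem.List.sorted lst (fun x => x) false).length := by omega
    have hg0 : PySem.List.pyGetD (PySem.List.sorted lst (fun x => x) false) 0 0
        = (PySem.List.sorted lst (fun x => x) false)[0]'(by omega) := by
      rw [PySem.List.pyGetD_eq_getElem _ 0 (by omega) (by omega)]
      simp
    have hg1 : PySem.List.pyGetD (PySem.List.sorted lst (fun x => x) false) 1 0
        = (PySem.List.sorted lst (fun x => x) false)[1]'(by omega) := by
      rw [PySem.List.pyGetD_eq_getElem _ 0 (by omega) (by omega)]
      simp
    have hg2 : PySem.List.pyGetD (PySem.List.sorted lst (fun x => x) false) 2 0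
        = (PySem.List.sorted lst (fun x => x) false)[2]'(by omega) := by
      rw [PySem.List.pyGetD_eq_getElem _ 0 (by omega) (by omega)]
      simp
    have hgm2 : PySem.List.pyGetD (PySem.List.sorted lst (fun x => x) false) (-2) 0
        = (PySem.List.sorted lst (fun x => x) false)[(PySem.List.sorted lst (fun x => x) false).length - 2]'(by omega) := by
      rw [PySem.List.pyGetD_neg_ofNat _ 2 0 (by omega) (by omega)]
    have hgm1 : PySem.List.pyGetD (PySem.List.sorted lst (fun x => x) false) (-1) 0
        = (PySem.List.sorted lst (fun x => x) false)[(PySem.List.sorted lst (fun x => x) false).length - 1]'(by omega) := by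
      rw [PySem.List.pyGetD_neg_ofNat _ 1 0 (by omega) (by omega)]
    rw [hg0, hg1, hg2, hgm2, hgm1]
    exact sorted_core lst _ hperm (by simpa using hpair) hslen
  · simp only [min_product, min_product_alt, if_neg h3]
    rw [hA, perms_nil (by omega)]
    rfl

-- ===== VERDICT (by name: the statement is the Claim_ definition above) =====
theorem min_product_spec : Claim_equal_min_product := by
  intro lst _
  exact main_lemma lst
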